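-- pv_equiv track=rewrite | github.com/SphericalKat/rush-hour | parser/src/rush_hour_parser/parser.py | _fix_midnight
-- ===== SOURCE A (Python) =====
-- def _fix_midnight(stops: list[tuple[str, int]]) -> list[tuple[str, int]]:
--     """Ensure departure times are monotonically increasing across midnight.
--
--     When a train crosses midnight the PDF still uses HH:MM from 00:00, so
--     a departure of e.g. 00:25 following 23:58 would appear to go backwards.
--     We detect this and add 1440 (one day in minutes) to subsequent times.
--     """
--     result = []
--     offset = 0
--     prev = -1
--     for station, minutes in stops:
--         t = minutes + offset
--         # A backward jump of more than 60 minutes means we crossed midnight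
--         if prev >= 0 and t < prev - 60:
--             offset += 1440
--             t += 1440
--         result.append((station, t))
--         prev = t
--     return result
-- ===== SOURCE B (Python) =====
-- def _fix_midnight(stops: list[tuple[str, int]]) -> list[tuple[str, int]]:
--     """Recursive tail-shifting version: when a departure drops more than 60
--     minutes below a preceding valid time of day, the train wrapped past
--     midnight, so push every remaining stop one day (1440 min) later and
--     recurse on the shifted tail.  No running offset is carried."""
--     if len(stops) < 2:
--         return list(stops)
--     (s1, m1), (s2, m2) = stops[0], stops[1]
--     tail = stops[1:]
--     if m1 >= 0 and m2 < m1 - 60: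
--         tail = [(s, m + 1440) for s, m in tail]
--     return [(s1, m1)] + _fix_midnight(tail)
-- ===== Notes on version B (the rewrite author's own statement) =====
-- stated objective: alternative
-- what changed: Replaces A's single stateful pass carrying (result, offset, prev) with a recursion that keeps no state at all: when a midnight wrap is detected between the first two stops, the whole remaining tail is shifted by 1440 and the function recurses on it (head-cons recursion, O(n^2) worst case instead of A's O(n)).
import Mathlib
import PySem

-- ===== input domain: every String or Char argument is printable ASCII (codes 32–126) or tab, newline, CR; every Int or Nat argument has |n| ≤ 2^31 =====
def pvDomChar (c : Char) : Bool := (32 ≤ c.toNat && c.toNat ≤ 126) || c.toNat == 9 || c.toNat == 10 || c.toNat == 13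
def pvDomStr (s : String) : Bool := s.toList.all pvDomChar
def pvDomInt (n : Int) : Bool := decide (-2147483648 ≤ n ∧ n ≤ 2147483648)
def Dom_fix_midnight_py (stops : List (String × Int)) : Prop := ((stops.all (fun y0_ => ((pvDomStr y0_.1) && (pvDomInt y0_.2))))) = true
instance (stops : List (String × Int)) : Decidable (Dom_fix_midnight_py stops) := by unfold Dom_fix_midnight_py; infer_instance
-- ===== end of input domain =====

-- B replaces A's stateful (result, offset, prev) pass with a stateless head-cons
-- recursion that shifts the whole remaining tail by 1440 on a wrap (objective:
-- alternative; O(n^2) worst case vs A's O(n)).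

-- ===== PORT A =====
-- single loop carrying (result, offset, prev)
def fix_midnight_py (stops : List (String × Int)) : List (String × Int) :=
  (stops.foldl
    (fun (acc : List (String × Int) × Int × Int) sp =>
      let result := acc.1
      let offset := acc.2.1
      let prev := acc.2.2
      let station := sp.1
      let minutes := sp.2
      let t := minutes + offset
      let ot : Int × Int :=
        if prev ≥ 0 ∧ t < prev - 60 then (offset + 1440, t + 1440) else (offset, t)
      (result ++ [(station, ot.2)], ot.1, ot.2))
    ([], 0, -1)).1

-- ===== PORT B =====
-- the tail-shift list comprehension
def pvShiftDay (l : List (String × Int)) : List (String × Int) :=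
  l.map (fun p => (p.1, p.2 + 1440))

def fix_midnight_py_alt (stops : List (String × Int)) : List (String × Int) :=
  match stops with
  | [] => []
  | [p] => [p]
  | (s1, m1) :: (s2, m2) :: rest =>
      let tail := (s2, m2) :: rest
      let tail := if m1 ≥ 0 ∧ m2 < m1 - 60 then pvShiftDay tail else tail
      (s1, m1) :: fix_midnight_py_alt tail
termination_by stops.length
decreasing_by
  simp_all [pvShiftDay]
  split <;> simp

-- ===== PRECONDITION & SPEC =====
def Spec_fix_midnight_py (stops : List (String × Int)) (out : List (String × Int)) : Prop := out = fix_midnight_py_alt stops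
instance (stops : List (String × Int)) (out : List (String × Int)) : Decidable (Spec_fix_midnight_py stops out) := by unfold Spec_fix_midnight_py; infer_instance

-- ===== CLAIM (what is proved, stated in full; the proofs are below) =====
def Claim_equal_fix_midnight_py : Prop := ∀ (stops : List (String × Int)), Dom_fix_midnight_py stops → Spec_fix_midnight_py stops (fix_midnight_py stops)

-- ===== LEMMAS AND PROOFS =====

-- A's loop as a plain recursion (no result accumulator)
def pvAGo : List (String × Int) → Int → Int → List (String × Int)
  | [], _, _ => []
  | (s, m) :: rest, off, prev =>
      let t := m + off
      if prev ≥ 0 ∧ t < prev - 60 then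
        (s, t + 1440) :: pvAGo rest (off + 1440) (t + 1440)
      else
        (s, t) :: pvAGo rest off t

-- the foldl accumulator is the emitted prefix
lemma pvA_fold (stops : List (String × Int)) :
    ∀ (res : List (String × Int)) (off prev : Int),
    (stops.foldl
      (fun (acc : List (String × Int) × Int × Int) sp =>
        let result := acc.1
        let offset := acc.2.1
        let prev := acc.2.2
        let station := sp.1
        let minutes := sp.2
        let t := minutes + offset
        let ot : Int × Int :=
          if prev ≥ 0 ∧ t < prev - 60 then (offset + 1440, t + 1440) else (offset, t)
        (result ++ [(station, ot.2)], ot.1, ot.2))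
      (res, off, prev)).1 = res ++ pvAGo stops off prev := by
  induction stops with
  | nil => intro res off prev; simp [pvAGo]
  | cons hd tl ih =>
      intro res off prev
      obtain ⟨s, m⟩ := hd
      by_cases h : prev ≥ 0 ∧ m + off < prev - 60
      · simp only [List.foldl_cons, pvAGo, if_pos h, ih]
        simp
      · simp only [List.foldl_cons, pvAGo, if_neg h, ih]
        simp

-- core: B on a tail already shifted by off, headed by the adjusted time t,
-- equals that head followed by A's recursion from (off, prev := t)
lemma pvB_go (rest : List (String × Int)) :
    ∀ (off t : Int) (s : String),
    fix_midnight_py_alt ((s, t) :: rest.map (fun p => (p.1, p.2 + off))) =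
      (s, t) :: pvAGo rest off t := by
  induction rest with
  | nil => intro off t s; simp [fix_midnight_py_alt, pvAGo]
  | cons hd tl ih =>
      intro off t s
      obtain ⟨s2, m2⟩ := hd
      rw [List.map_cons]
      rw [fix_midnight_py_alt]
      by_cases h : t ≥ 0 ∧ m2 + off < t - 60
      · have hB : t ≥ 0 ∧ m2 + off < t - 60 := h
        simp only [if_pos hB, pvShiftDay, List.map_cons, List.map_map]
        have hmap : tl.map ((fun p : String × Int => (p.1, p.2 + 1440)) ∘
            fun p : String × Int => (p.1, p.2 + off)) =
            tl.map (fun p => (p.1, p.2 + (off + 1440))) := by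
          apply List.map_congr_left; intro a _; simp; ring
        rw [hmap]
        have h2 : m2 + off + 1440 = m2 + (off + 1440) := by ring
        rw [h2, ih (off + 1440) (m2 + (off + 1440)) s2]
        simp only [pvAGo, if_pos h, h2]
      · simp only [if_neg h]
        rw [ih off (m2 + off) s2]
        simp only [pvAGo, if_neg h]

-- ===== VERDICT (by name: the statement is the Claim_ definition above) =====
theorem fix_midnight_py_spec : Claim_equal_fix_midnight_py := by
  intro stops _
  unfold Spec_fix_midnight_py fix_midnight_py
  rw [pvA_fold]
  cases stops with
  | nil => simp [pvAGo, fix_midnight_py_alt]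
  | cons hd tl =>
      obtain ⟨s0, m0⟩ := hd
      have hfirst : ¬ ((-1 : Int) ≥ 0 ∧ m0 + 0 < -1 - 60) := by omega
      simp only [pvAGo, if_neg hfirst, List.nil_append]
      have := pvB_go tl 0 (m0 + 0) s0
      simp only [add_zero] at this ⊢
      rw [← this]
      congr 1
      simp
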